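-- pv_equiv track=rewrite | github.com/jackfrost168/adventofcode | 2016/day2.py | part1
-- ===== SOURCE A (Python) =====
-- def part1(instructions):
--     code = ''
--     x, y = 1, 1
--     directions = {'U': (-1, 0), 'R': (0, 1), 'D': (1, 0), 'L': (0, -1)}
--     for ins in instructions:
--         for s in ins:
--             dir_x, dir_y = directions[s]
--             if 0 <= x + dir_x <= 2 and 0 <= y + dir_y <= 2:
--                 x += dir_x
--                 y += dir_y
--         button = str(x * 3 + y + 1)
--         code += button
--     return code
-- ===== SOURCE B (Python) =====
-- def part1(instructions):
--     # The two axes are independent: U/D only move the row, L/R only the column,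
--     # and a rejected out-of-bounds move is the same as clamping to {0,1,2}.
--     # For each line, compose the line's transfer function on a whole axis,
--     # tabulated as the list of outcomes for every possible starting position,
--     # then index it with the current position.
--     def line_effect(line, dec, inc):
--         f = [0, 1, 2]  # identity on axis positions
--         for c in line:
--             if c == dec:
--                 f = [p - (p > 0) for p in f]
--             elif c == inc:
--                 f = [p + (p < 2) for p in f]
--         return f
--     row, col = 1, 1
--     out = []
--     for line in instructions:
--         row = line_effect(line, 'U', 'D')[row]
--         col = line_effect(line, 'L', 'R')[col]
--         out.append(str(3 * row + col + 1))
--     return ''.join(out)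
-- ===== Notes on version B (the rewrite author's own statement) =====
-- stated objective: alternative
-- what changed: Decouples the two keypad axes and, per instruction line, composes the line's transfer function over all three positions of an axis (a tabulated map built by pointwise clamped shifts) and then indexes it with the current position, instead of stepping a single (x,y) point with guarded coordinate arithmetic.
import Mathlib
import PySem

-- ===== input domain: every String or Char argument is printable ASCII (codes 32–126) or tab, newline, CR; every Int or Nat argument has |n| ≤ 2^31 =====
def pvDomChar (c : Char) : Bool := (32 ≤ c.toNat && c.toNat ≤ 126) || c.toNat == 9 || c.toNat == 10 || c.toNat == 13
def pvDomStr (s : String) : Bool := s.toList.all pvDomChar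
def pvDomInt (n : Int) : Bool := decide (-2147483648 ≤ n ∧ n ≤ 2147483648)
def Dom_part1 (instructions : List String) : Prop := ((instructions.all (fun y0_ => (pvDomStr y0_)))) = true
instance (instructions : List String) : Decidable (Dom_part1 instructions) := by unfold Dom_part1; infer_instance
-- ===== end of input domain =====

-- B decouples the two keypad axes and composes each line's transfer function, tabulated
-- over all three positions of an axis, before indexing it with the current position
-- (objective: alternative; same asymptotic cost).

-- ===== PORT A =====
-- directions dict; lookup via get? (none = KeyError, excluded by Pre_), defaulted to (0,0) for totality
def part1Dirs : PySem.Dict Char (Int × Int) :=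
  PySem.Dict.ofList [('U', (-1, 0)), ('R', (0, 1)), ('D', (1, 0)), ('L', (0, -1))]

def part1Inner (cs : List Char) (xy : Int × Int) : Int × Int :=
  cs.foldl (fun (p : Int × Int) s =>
    let d := (part1Dirs.get? s).getD (0, 0)
    if 0 ≤ p.1 + d.1 ∧ p.1 + d.1 ≤ 2 ∧ 0 ≤ p.2 + d.2 ∧ p.2 + d.2 ≤ 2 then
      (p.1 + d.1, p.2 + d.2)
    else p) xy

def part1 (instructions : List String) : String :=
  let st := instructions.foldl (fun (st : List Char × Int × Int) ins =>
    let xy := part1Inner ins.toList st.2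
    (st.1 ++ PySem.Int.toChars (xy.1 * 3 + xy.2 + 1), xy)) ([], 1, 1)
  String.ofList st.1

-- ===== PORT B =====
-- one step of Source B's line_effect: the per-character update of the tabulated axis map
def pvStepV (dec inc : Char) (f : List Int) (c : Char) : List Int :=
  if c = dec then f.map (fun p => p - (if p > 0 then 1 else 0))
  else if c = inc then f.map (fun p => p + (if p < 2 then 1 else 0))
  else f

-- Source B's line_effect: fold the characters into the line's transfer table, starting identity
def pvLineEffect (cs : List Char) (dec inc : Char) : List Int :=
  cs.foldl (pvStepV dec inc) [0, 1, 2]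

-- tuple indexing f[row]; the .getD 0 only totalises the out-of-range case Python raises on
def part1_alt (instructions : List String) : String :=
  let st := instructions.foldl (fun (st : List Char × Int × Int) line =>
    let row := (PySem.List.pyGet? (pvLineEffect line.toList 'U' 'D') st.2.1).getD 0
    let col := (PySem.List.pyGet? (pvLineEffect line.toList 'L' 'R') st.2.2).getD 0
    (st.1 ++ PySem.Int.toChars (3 * row + col + 1), row, col)) ([], 1, 1)
  String.ofList st.1

-- ===== PRECONDITION & SPEC =====
-- Pre_ excludes instruction characters outside 'UDLR', on which the Python A raises KeyError.
def Pre_part1 (instructions : List String) : Prop :=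
  (instructions.all (fun s => s.toList.all (fun c => c == 'U' || c == 'D' || c == 'L' || c == 'R'))) = true
instance (instructions : List String) : Decidable (Pre_part1 instructions) := by
  unfold Pre_part1; infer_instance

def pvWitness_part1 : List String := ["UL", "D"]

def Spec_part1 (instructions : List String) (out : String) : Prop := out = part1_alt instructions
instance (instructions : List String) (out : String) : Decidable (Spec_part1 instructions out) := by unfold Spec_part1; infer_instance

-- ===== CLAIM (what is proved, stated in full; the proofs are below) =====
def Claim_equal_part1 : Prop := ∀ (instructions : List String), Dom_part1 instructions → Pre_part1 instructions → Spec_part1 instructions (part1 instructions)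

-- ===== LEMMAS AND PROOFS =====

-- pointwise axis steps (U/D on the row, L/R on the column)
def pvRowStep (x : Int) (c : Char) : Int :=
  if c = 'U' then x - (if x > 0 then 1 else 0)
  else if c = 'D' then x + (if x < 2 then 1 else 0) else x

def pvColStep (y : Int) (c : Char) : Int :=
  if c = 'L' then y - (if y > 0 then 1 else 0)
  else if c = 'R' then y + (if y < 2 then 1 else 0) else y

lemma pvStepV_len (dec inc : Char) (f : List Int) (c : Char) :
    (pvStepV dec inc f c).length = f.length := by
  unfold pvStepV; split_ifs <;> simp

lemma pvGet_stepV (dec inc : Char) (f : List Int) (c : Char) (x : Int)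
    (h0 : 0 ≤ x) (h3 : x < (f.length : Int)) :
    (PySem.List.pyGet? (pvStepV dec inc f c) x).getD 0 =
      (if c = dec then ((PySem.List.pyGet? f x).getD 0) - (if ((PySem.List.pyGet? f x).getD 0) > 0 then 1 else 0)
       else if c = inc then ((PySem.List.pyGet? f x).getD 0) + (if ((PySem.List.pyGet? f x).getD 0) < 2 then 1 else 0)
       else (PySem.List.pyGet? f x).getD 0) := by
  obtain ⟨n, rfl⟩ := Int.eq_ofNat_of_zero_le h0
  have hx : n < f.length := by exact_mod_cast h3
  unfold pvStepV
  by_cases h1 : c = dec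
  · simp [h1, List.getElem?_eq_getElem hx]
  · by_cases h2 : c = inc
    · have hne : inc ≠ dec := h2 ▸ h1
      simp [h2, hne, List.getElem?_eq_getElem hx]
    · simp [h1, h2]

-- indexing the folded table = folding the pointwise step on the indexed value
lemma pvVFold (dec inc : Char) (cs : List Char) (f : List Int) (x : Int)
    (h0 : 0 ≤ x) (h3 : x < (f.length : Int)) :
    (PySem.List.pyGet? (cs.foldl (pvStepV dec inc) f) x).getD 0 =
      cs.foldl (fun p c =>
        if c = dec then p - (if p > 0 then 1 else 0)
        else if c = inc then p + (if p < 2 then 1 else 0) else p)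
        ((PySem.List.pyGet? f x).getD 0) := by
  induction cs generalizing f with
  | nil => rfl
  | cons c cs ih =>
    rw [List.foldl_cons, List.foldl_cons,
      ih (pvStepV dec inc f c) (by rw [pvStepV_len]; exact h3),
      pvGet_stepV dec inc f c x h0 h3]

lemma pvRowStep_bounds (x : Int) (c : Char) (h0 : 0 ≤ x) (h2 : x ≤ 2) :
    0 ≤ pvRowStep x c ∧ pvRowStep x c ≤ 2 := by
  unfold pvRowStep; split_ifs <;> omega

lemma pvColStep_bounds (y : Int) (c : Char) (h0 : 0 ≤ y) (h2 : y ≤ 2) :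
    0 ≤ pvColStep y c ∧ pvColStep y c ≤ 2 := by
  unfold pvColStep; split_ifs <;> omega

-- one A-step decouples into the two pointwise axis steps
lemma pvStepA (x y : Int) (c : Char) (hc : c = 'U' ∨ c = 'D' ∨ c = 'L' ∨ c = 'R')
    (hx : 0 ≤ x) (hx2 : x ≤ 2) (hy : 0 ≤ y) (hy2 : y ≤ 2) :
    part1Inner [c] (x, y) = (pvRowStep x c, pvColStep y c) := by
  interval_cases x <;> interval_cases y <;> rcases hc with rfl | rfl | rfl | rfl <;> decide

lemma pvDecouple (cs : List Char) (x y : Int)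
    (hcs : ∀ c ∈ cs, c = 'U' ∨ c = 'D' ∨ c = 'L' ∨ c = 'R')
    (hx : 0 ≤ x) (hx2 : x ≤ 2) (hy : 0 ≤ y) (hy2 : y ≤ 2) :
    part1Inner cs (x, y) = (cs.foldl pvRowStep x, cs.foldl pvColStep y) := by
  induction cs generalizing x y with
  | nil => rfl
  | cons c cs ih =>
    have hc := hcs c (by simp)
    have hsplit : part1Inner (c :: cs) (x, y) =
        part1Inner cs ((part1Inner [c] (x, y)).1, (part1Inner [c] (x, y)).2) := by
      simp [part1Inner]
    rw [hsplit, pvStepA x y c hc hx hx2 hy hy2]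
    obtain ⟨hr1, hr2⟩ := pvRowStep_bounds x c hx hx2
    obtain ⟨hc1, hc2⟩ := pvColStep_bounds y c hy hy2
    simpa using ih (pvRowStep x c) (pvColStep y c)
      (fun c' hc' => hcs c' (by simp [hc'])) hr1 hr2 hc1 hc2

lemma pvFold_bounds (step : Int → Char → Int)
    (hstep : ∀ x c, 0 ≤ x → x ≤ 2 → 0 ≤ step x c ∧ step x c ≤ 2)
    (cs : List Char) (x : Int) (h0 : 0 ≤ x) (h2 : x ≤ 2) :
    0 ≤ cs.foldl step x ∧ cs.foldl step x ≤ 2 := by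
  induction cs generalizing x with
  | nil => exact ⟨h0, h2⟩
  | cons c cs ih =>
    obtain ⟨a, b⟩ := hstep x c h0 h2
    exact ih _ a b

-- B's per-line row/col update equals the pointwise fold on the indexed position
lemma pvAltLine (cs : List Char) (x : Int) (h0 : 0 ≤ x) (h2 : x ≤ 2) :
    (PySem.List.pyGet? (pvLineEffect cs 'U' 'D') x).getD 0 = cs.foldl pvRowStep x ∧
    (PySem.List.pyGet? (pvLineEffect cs 'L' 'R') x).getD 0 = cs.foldl pvColStep x := by
  have hid : (PySem.List.pyGet? [0, 1, 2] x).getD 0 = x := by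
    interval_cases x <;> decide
  have hlen : x < (([0, 1, 2] : List Int).length : Int) := by simp; omega
  constructor
  · rw [pvLineEffect, pvVFold 'U' 'D' cs [0, 1, 2] x h0 hlen, hid]; rfl
  · rw [pvLineEffect, pvVFold 'L' 'R' cs [0, 1, 2] x h0 hlen, hid]; rfl

lemma pre_forall (instructions : List String) (h : Pre_part1 instructions) :
    ∀ s ∈ instructions, ∀ c ∈ s.toList, c = 'U' ∨ c = 'D' ∨ c = 'L' ∨ c = 'R' := by
  intro s hs c hc
  simp only [Pre_part1, List.all_eq_true, Bool.or_eq_true, beq_iff_eq] at h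
  have := h s hs c hc
  tauto

lemma pv_main (instructions : List String) (acc : List Char) (x y : Int)
    (hpre : ∀ s ∈ instructions, ∀ c ∈ s.toList, c = 'U' ∨ c = 'D' ∨ c = 'L' ∨ c = 'R')
    (hx : 0 ≤ x) (hx2 : x ≤ 2) (hy : 0 ≤ y) (hy2 : y ≤ 2) :
    (instructions.foldl (fun (st : List Char × Int × Int) ins =>
      let xy := part1Inner ins.toList st.2
      (st.1 ++ PySem.Int.toChars (xy.1 * 3 + xy.2 + 1), xy)) (acc, x, y)).1 =
    (instructions.foldl (fun (st : List Char × Int × Int) line =>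
      let row := (PySem.List.pyGet? (pvLineEffect line.toList 'U' 'D') st.2.1).getD 0
      let col := (PySem.List.pyGet? (pvLineEffect line.toList 'L' 'R') st.2.2).getD 0
      (st.1 ++ PySem.Int.toChars (3 * row + col + 1), row, col)) (acc, x, y)).1 := by
  induction instructions generalizing acc x y with
  | nil => rfl
  | cons line rest ih =>
    have hline := pvDecouple line.toList x y (hpre line (by simp)) hx hx2 hy hy2
    have hrow := (pvAltLine line.toList x hx hx2).1
    have hcol := (pvAltLine line.toList y hy hy2).2
    obtain ⟨hr1, hr2⟩ := pvFold_bounds pvRowStep pvRowStep_bounds line.toList x hx hx2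
    obtain ⟨hc1, hc2⟩ := pvFold_bounds pvColStep pvColStep_bounds line.toList y hy hy2
    simp only [List.foldl_cons, hline, hrow, hcol]
    rw [Int.mul_comm (List.foldl pvRowStep x line.toList) 3]
    exact ih _ _ _ (fun s hs => hpre s (by simp [hs])) hr1 hr2 hc1 hc2

-- ===== VERDICT (by name: the statement is the Claim_ definition above) =====
theorem part1_spec : Claim_equal_part1 := by
  intro instructions _ hpre
  unfold Spec_part1 part1 part1_alt
  simp only []
  rw [pv_main instructions [] 1 1 (pre_forall instructions hpre) (by norm_num) (by norm_num) (by norm_num) (by norm_num)]
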